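-- pv_equiv track=rewrite | github.com/minhtuan12/python-ptit | PY01066_XauThangBang.py | check
-- ===== SOURCE A (Python) =====
-- def check(s):
--     rev = ""
--     for i in s:
--         rev = i + rev
--
--     for i in range(1, len(s)):
--         if abs(ord(s[i]) - ord(s[i - 1])) != abs(ord(rev[i]) - ord(rev[i - 1])):
--             return False
--     return True
-- ===== SOURCE B (Python) =====
-- def check(s):
--     d = [abs(ord(x) - ord(y)) for x, y in zip(s[1:], s)]
--     i, j = 0, len(d) - 1
--     while i < j:
--         if d[i] != d[j]:
--             return False
--         i += 1
--         j -= 1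
--     return True
-- ===== Notes on version B (the rewrite author's own statement) =====
-- stated objective: faster
-- what changed: B never constructs the reversed string: it builds the adjacent-difference list in one pass and checks it is a palindrome with a two-pointer loop that stops at the middle; A's character-by-character string prepend makes its reversal quadratic.
import Mathlib
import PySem

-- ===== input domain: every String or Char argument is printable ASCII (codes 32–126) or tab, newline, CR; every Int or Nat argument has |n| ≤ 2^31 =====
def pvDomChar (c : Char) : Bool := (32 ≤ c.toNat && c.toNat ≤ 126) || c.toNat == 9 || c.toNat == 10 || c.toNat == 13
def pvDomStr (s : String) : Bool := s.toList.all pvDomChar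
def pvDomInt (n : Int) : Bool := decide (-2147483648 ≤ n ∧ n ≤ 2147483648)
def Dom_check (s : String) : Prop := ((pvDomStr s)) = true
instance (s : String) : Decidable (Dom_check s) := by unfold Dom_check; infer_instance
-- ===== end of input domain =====

-- B replaces A's reversed-string construction with a one-pass difference list and a
-- two-pointer palindrome check (stops at the middle); return-value equivalence proved below.

-- ===== PORT A =====
-- ord(xs[i]); every index A's loop uses is in range, where pyGetD is exact
def ordAt (l : List Char) (i : Int) : Int :=
  ((PySem.List.pyGetD l i default).toNat : Int)

def checkGo (l rev : List Char) : List Int → Bool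
  | [] => true
  | i :: is =>
    if |ordAt l i - ordAt l (i - 1)| ≠ |ordAt rev i - ordAt rev (i - 1)| then false
    else checkGo l rev is

def check (s : String) : Bool :=
  let l := s.toList
  let rev := l.foldl (fun rev c => [c] ++ rev) []
  checkGo l rev (PySem.List.pyRange 1 (l.length : Int) 1)

-- ===== PORT B =====
-- while i < j loop; d[i], d[j] are in range throughout, where pyGetD is exact
def twoPtr (d : List Int) (i j : Int) : Bool :=
  if i < j then
    if PySem.List.pyGetD d i 0 ≠ PySem.List.pyGetD d j 0 then false
    else twoPtr d (i + 1) (j - 1)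
  else true
termination_by (j - i).toNat
decreasing_by omega

def check_alt (s : String) : Bool :=
  let l := s.toList
  let d := ((PySem.List.slice l (some 1) none).zip l).map
    (fun p => |((p.1.toNat : Int)) - ((p.2.toNat : Int))|)
  twoPtr d 0 ((d.length : Int) - 1)

-- ===== PRECONDITION & SPEC =====
def Spec_check (s : String) (out : Bool) : Prop := out = check_alt s
instance (s : String) (out : Bool) : Decidable (Spec_check s out) := by unfold Spec_check; infer_instance

-- ===== CLAIM (what is proved, stated in full; the proofs are below) =====
def Claim_equal_check : Prop := ∀ (s : String), Dom_check s → Spec_check s (check s)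

-- ===== LEMMAS AND PROOFS =====

-- the character code at Nat index k (0 out of range; all uses are in range)
def cc (l : List Char) (k : Nat) : Int := ((l.getD k default).toNat : Int)

-- adjacent difference at diff-index t ≥ 1
def gg (l : List Char) (t : Nat) : Int := |cc l t - cc l (t - 1)|

-- the shared palindromic-differences property
def Pal (l : List Char) : Prop :=
  ∀ t : Nat, 1 ≤ t → 2 * t < l.length → gg l t = gg l (l.length - t)

theorem foldl_prepend (l acc : List Char) :
    l.foldl (fun r c => [c] ++ r) acc = l.reverse ++ acc := by
  induction l generalizing acc with
  | nil => simp
  | cons x xs ih => simp [List.foldl_cons]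

theorem checkGo_iff (l rev : List Char) (is : List Int) :
    checkGo l rev is = true ↔
      ∀ i ∈ is, |ordAt l i - ordAt l (i - 1)| = |ordAt rev i - ordAt rev (i - 1)| := by
  induction is with
  | nil => simp [checkGo]
  | cons i is ih =>
    by_cases h : |ordAt l i - ordAt l (i - 1)| = |ordAt rev i - ordAt rev (i - 1)| <;>
      simp [checkGo, h, ih]

theorem twoPtr_iff (d : List Int) (i j : Int) :
    twoPtr d i j = true ↔
      ∀ a b : Int, i ≤ a → a < b → b ≤ j → a + b = i + j →
        PySem.List.pyGetD d a 0 = PySem.List.pyGetD d b 0 := by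
  by_cases hij : i < j
  · rw [twoPtr, if_pos hij]
    by_cases hd : PySem.List.pyGetD d i 0 = PySem.List.pyGetD d j 0
    · rw [if_neg (by simpa using hd), twoPtr_iff d (i + 1) (j - 1)]
      constructor
      · intro H a b ha hab hb hsum
        by_cases hai : a = i
        · have hbj : b = j := by omega
          simpa [hai, hbj] using hd
        · exact H a b (by omega) hab (by omega) (by omega)
      · intro H a b ha hab hb hsum
        exact H a b (by omega) hab (by omega) (by omega)
    · rw [if_pos (by simpa using hd)]
      constructor
      · intro h; exact absurd h (by simp)
      · intro H; exact absurd (H i j le_rfl hij le_rfl rfl) hd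
  · rw [twoPtr, if_neg hij]
    constructor
    · intro _ a b ha hab hb hsum; omega
    · intro _; rfl
termination_by (j - i).toNat
decreasing_by omega

theorem ordAt_eq_cc (l : List Char) (i : Int) (h0 : 0 ≤ i) (h1 : i < l.length) :
    ordAt l i = cc l i.toNat := by
  unfold ordAt cc
  rw [PySem.List.pyGetD_eq_getElem l default h0 h1,
      List.getD_eq_getElem l default (by omega)]

theorem cc_reverse (l : List Char) (k : Nat) (hk : k < l.length) :
    cc l.reverse k = cc l (l.length - 1 - k) := by
  unfold cc
  rw [List.getD_eq_getElem l.reverse default (by simpa using hk),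
      List.getElem_reverse,
      List.getD_eq_getElem l default (by omega)]

theorem check_iff_pal (s : String) : check s = true ↔ Pal s.toList := by
  set l := s.toList with hl
  set n := l.length with hn
  show checkGo l (l.foldl (fun rev c => [c] ++ rev) []) (PySem.List.pyRange 1 (n : Int) 1)
      = true ↔ Pal l
  rw [foldl_prepend, List.append_nil, checkGo_iff, PySem.List.pyRange_one]
  have key : (∀ i ∈ (List.range ((n : Int) - 1).toNat).map (fun k : Nat => (1 : Int) + k),
      |ordAt l i - ordAt l (i - 1)| = |ordAt l.reverse i - ordAt l.reverse (i - 1)|) ↔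
      (∀ k : Nat, k + 1 < n → gg l (k + 1) = gg l (n - 1 - k)) := by
    constructor
    · intro H k hk
      have hmem : ((1 : Int) + k) ∈ (List.range ((n : Int) - 1).toNat).map
          (fun k : Nat => (1 : Int) + k) := by
        simp only [List.mem_map, List.mem_range]
        exact ⟨k, by omega, rfl⟩
      have h := H _ hmem
      have e1 : ordAt l (1 + (k : Int)) = cc l (k + 1) := by
        rw [ordAt_eq_cc l _ (by omega) (by omega)]; congr 1; omega
      have e2 : ordAt l (1 + (k : Int) - 1) = cc l k := by
        rw [ordAt_eq_cc l _ (by omega) (by omega)]; congr 1; omega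
      have e3 : ordAt l.reverse (1 + (k : Int)) = cc l (n - 2 - k) := by
        rw [ordAt_eq_cc l.reverse _ (by omega) (by simpa using (by omega : (1 + (k:Int)) < n)),
            cc_reverse l _ (by omega)]
        congr 1; omega
      have e4 : ordAt l.reverse (1 + (k : Int) - 1) = cc l (n - 1 - k) := by
        rw [ordAt_eq_cc l.reverse _ (by omega) (by simpa using (by omega : (1 + (k:Int) - 1) < n)),
            cc_reverse l _ (by omega)]
        congr 1; omega
      rw [e1, e2, e3, e4] at h
      unfold gg
      rw [show (k + 1) - 1 = k from by omega, show (n - 1 - k) - 1 = n - 2 - k from by omega]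
      rw [h, abs_sub_comm]
    · intro H i hi
      simp only [List.mem_map, List.mem_range] at hi
      obtain ⟨k, hk, rfl⟩ := hi
      have hk' : k + 1 < n := by omega
      have h := H k hk'
      unfold gg at h
      rw [show (k + 1) - 1 = k from by omega, show (n - 1 - k) - 1 = n - 2 - k from by omega] at h
      have e1 : ordAt l (1 + (k : Int)) = cc l (k + 1) := by
        rw [ordAt_eq_cc l _ (by omega) (by omega)]; congr 1; omega
      have e2 : ordAt l (1 + (k : Int) - 1) = cc l k := by
        rw [ordAt_eq_cc l _ (by omega) (by omega)]; congr 1; omega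
      have e3 : ordAt l.reverse (1 + (k : Int)) = cc l (n - 2 - k) := by
        rw [ordAt_eq_cc l.reverse _ (by omega) (by simpa using (by omega : (1 + (k:Int)) < n)),
            cc_reverse l _ (by omega)]
        congr 1; omega
      have e4 : ordAt l.reverse (1 + (k : Int) - 1) = cc l (n - 1 - k) := by
        rw [ordAt_eq_cc l.reverse _ (by omega) (by simpa using (by omega : (1 + (k:Int) - 1) < n)),
            cc_reverse l _ (by omega)]
        congr 1; omega
      rw [e1, e2, e3, e4, h, abs_sub_comm]
  rw [key]
  unfold Pal
  constructor
  · intro H t ht h2t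
    have h := H (t - 1) (by omega)
    rw [show t - 1 + 1 = t from by omega, show n - 1 - (t - 1) = n - t from by omega] at h
    exact h
  · intro H k hk
    rcases lt_trichotomy (2 * (k + 1)) n with h | h | h
    · have := H (k + 1) (by omega) h
      rwa [show n - (k + 1) = n - 1 - k from by omega] at this
    · rw [show n - 1 - k = k + 1 from by omega]
    · have := H (n - 1 - k) (by omega) (by omega)
      rw [show n - (n - 1 - k) = k + 1 from by omega] at this
      exact this.symm

theorem check_alt_iff_pal (s : String) : check_alt s = true ↔ Pal s.toList := by
  set l := s.toList with hl
  set n := l.length with hn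
  show twoPtr (((PySem.List.slice l (some 1) none).zip l).map
      (fun p => |((p.1.toNat : Int)) - ((p.2.toNat : Int))|)) 0
      (((((PySem.List.slice l (some 1) none).zip l).map
      (fun p => |((p.1.toNat : Int)) - ((p.2.toNat : Int))|)).length : Int) - 1) = true ↔ Pal l
  rw [PySem.List.slice_from_one, twoPtr_iff]
  set d := ((l.tail.zip l).map (fun p => |((p.1.toNat : Int)) - ((p.2.toNat : Int))|)) with hd
  have hdl : d.length = n - 1 := by
    simp [hd, List.length_zip, List.length_tail]
    omega
  have dget : ∀ t : Nat, t < n - 1 → PySem.List.pyGetD d (t : Int) 0 = gg l (t + 1) := by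
    intro t ht
    rw [PySem.List.pyGetD_natCast, List.getD_eq_getElem d 0 (by omega)]
    simp only [hd, List.getElem_map, List.getElem_zip, List.getElem_tail]
    unfold gg cc
    rw [List.getD_eq_getElem l default (by omega), List.getD_eq_getElem l default (by omega)]
    congr 2
  constructor
  · intro H t ht h2t
    have ha : (0 : Int) ≤ (t : Int) - 1 := by omega
    have h := H ((t : Int) - 1) ((n : Int) - 1 - t) (by omega) (by omega)
      (by omega) (by push_cast [hdl]; omega)
    have e1 : ((t : Int) - 1) = ((t - 1 : Nat) : Int) := by omega
    have e2 : ((n : Int) - 1 - t) = ((n - 1 - t : Nat) : Int) := by omega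
    rw [e1, e2, dget (t - 1) (by omega), dget (n - 1 - t) (by omega)] at h
    rw [show t - 1 + 1 = t from by omega, show n - 1 - t + 1 = n - t from by omega] at h
    exact h
  · intro H a b ha hab hb hsum
    have hbn : b < (d.length : Int) := by omega
    have e1 : a = ((a.toNat : Nat) : Int) := by omega
    have e2 : b = ((b.toNat : Nat) : Int) := by omega
    rw [e1, e2, dget a.toNat (by omega), dget b.toNat (by omega)]
    have := H (a.toNat + 1) (by omega) (by omega)
    rw [show n - (a.toNat + 1) = b.toNat + 1 from by push_cast [hdl] at hsum hbn ⊢; omega] at this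
    exact this

-- ===== VERDICT (by name: the statement is the Claim_ definition above) =====
theorem check_spec : Claim_equal_check := by
  intro s _
  unfold Spec_check
  have h := (check_iff_pal s).trans (check_alt_iff_pal s).symm
  cases hA : check s <;> cases hB : check_alt s <;> simp_all
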